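-- pv_equiv track=rewrite | github.com/jordibc/multivector | geometric_algebra.py | next_element
-- ===== SOURCE A (Python) =====
-- def is_last(e, n, start=1):
--     """Is e the last of the blades with that number of vectors?"""
--     # An example of last blade for n=4, with 2 vectors: [2, 3]
--     return e == list(range(start + n - len(e), start + n))
--
-- def next_element(e, n, start=1):
--     """Return the multivector (in dim n) base element next to e."""
--     if is_last(e, n, start):
--         return list(range(start, start+len(e)+1)) if len(e) < n else None
--
--     e_next = e.copy()  # new element (we will modify it in-place)
--
--     # Find the last position that doesn't contain its maximum possible value.
--     pos = next(len(e_next) - 1 - i for i in range(len(e_next))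
--                if e_next[-1 - i] != start + n - 1 - i)  # max possible value
--
--     e_next[pos] += 1  # increment at that position
--     for i in range(pos + 1, len(e_next)):
--         e_next[i] = e_next[i-1] + 1  # and make the following ones follow up
--
--     return e_next
-- ===== SOURCE B (Python) =====
-- def next_element(e, n, start=1):
--     """Return the multivector (in dim n) base element next to e."""
--     def succ(rev, maxval):
--         # Successor of the blade whose reversed form is rev, where maxval is
--         # the maximum allowed value at rev's head; None if every position is
--         # already at its maximum.  Built while unwinding the recursion: each
--         # frame whose head was maximal appends the next cascade value.
--         if not rev:
--             return None
--         if rev[0] != maxval: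
--             return rev[1:][::-1] + [rev[0] + 1]
--         r = succ(rev[1:], maxval - 1)
--         return r + [r[-1] + 1] if r is not None else None
--
--     r = succ(e[::-1], start + n - 1)
--     if r is not None:
--         return r
--     return list(range(start, start + len(e) + 1)) if len(e) < n else None
-- ===== Notes on version B (the rewrite author's own statement) =====
-- stated objective: alternative
-- what changed: B replaces A's three stages (an is_last equality pass against a freshly built range list, a generator search for the rightmost non-maximal position, and an in-place increment-plus-cascade loop) by a single structural recursion on the reversed blade that builds the successor while unwinding, each frame whose head was maximal appending the next cascade value.
import Mathlib
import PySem

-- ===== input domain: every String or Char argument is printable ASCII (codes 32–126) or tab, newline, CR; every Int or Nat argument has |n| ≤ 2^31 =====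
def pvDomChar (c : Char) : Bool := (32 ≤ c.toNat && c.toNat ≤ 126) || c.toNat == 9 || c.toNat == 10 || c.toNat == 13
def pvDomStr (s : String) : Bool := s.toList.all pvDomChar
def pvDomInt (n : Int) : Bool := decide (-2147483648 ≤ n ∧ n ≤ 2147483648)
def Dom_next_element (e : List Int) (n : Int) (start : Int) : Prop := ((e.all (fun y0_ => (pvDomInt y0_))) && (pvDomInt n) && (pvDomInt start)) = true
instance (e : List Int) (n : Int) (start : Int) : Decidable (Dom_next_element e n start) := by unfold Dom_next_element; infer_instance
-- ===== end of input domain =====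

-- B replaces A's three stages (is_last equality pass, generator search for the
-- rightmost non-maximal position, in-place cascade loop) by one structural
-- recursion on the reversed blade that builds the successor while unwinding.

-- ===== PORT A =====
def is_last (e : List Int) (n : Int) (start : Int) : Bool :=
  e = PySem.List.pyRange (start + n - e.length) (start + n) 1

-- 'next(len(e)-1-i for i in range(len(e)) if e[-1-i] != start+n-1-i)': scan i upward
def findA (e : List Int) (n : Int) (start : Int) (i : Nat) : Option Nat :=
  if i < e.length then
    if (PySem.List.pyGet? e (-1 - (i : Int))).getD 0 ≠ start + n - 1 - i then
      some (e.length - 1 - i)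
    else findA e n start (i + 1)
  else none
termination_by e.length - i

-- 'for i in range(pos+1, len(e)): e_next[i] = e_next[i-1] + 1'
def cascadeA (l : List Int) (i : Nat) : List Int :=
  if i < l.length then cascadeA (l.set i (l.getD (i - 1) 0 + 1)) (i + 1) else l
termination_by l.length - i
decreasing_by simp_all; omega

def next_element (e : List Int) (n : Int) (start : Int) : Option (List Int) :=
  if is_last e n start then
    if (e.length : Int) < n then
      some (PySem.List.pyRange start (start + e.length + 1) 1)
    else none
  else
    match findA e n start 0 with
    | none => none  -- unreachable: the generator cannot exhaust when e is not last
    | some pos => some (cascadeA (e.set pos (e.getD pos 0 + 1)) (pos + 1))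

-- ===== PORT B =====
-- the inner 'succ' of Source B: recursion on the reversed blade
def succB : List Int → Int → Option (List Int)
  | [], _ => none
  | v :: rest, maxval =>
    if v ≠ maxval then
      some (rest.reverse ++ [v + 1])          -- rev[1:][::-1] + [rev[0] + 1]
    else
      match succB rest (maxval - 1) with
      | some r => (PySem.List.pyGet? r (-1)).map (fun last => r ++ [last + 1])  -- r + [r[-1] + 1]
      | none => none

def next_element_alt (e : List Int) (n : Int) (start : Int) : Option (List Int) :=
  match succB e.reverse (start + n - 1) with
  | some r => some r
  | none =>
    if (e.length : Int) < n then
      some (PySem.List.pyRange start (start + e.length + 1) 1)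
    else none

-- ===== PRECONDITION & SPEC =====
def Spec_next_element (e : List Int) (n : Int) (start : Int) (out : Option (List Int)) : Prop := out = next_element_alt e n start
instance (e : List Int) (n : Int) (start : Int) (out : Option (List Int)) : Decidable (Spec_next_element e n start out) := by unfold Spec_next_element; infer_instance

-- ===== CLAIM (what is proved, stated in full; the proofs are below) =====
def Claim_equal_next_element : Prop := ∀ (e : List Int) (n : Int) (start : Int), Dom_next_element e n start → Spec_next_element e n start (next_element e n start)

-- ===== LEMMAS AND PROOFS =====

-- the successor list A builds when position p is the rightmost non-maximal one
def buildB (e : List Int) (p : Nat) : List Int :=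
  e.take p ++ (List.range (e.length - p)).map (fun k : Nat => e.getD p 0 + 1 + (k:Int))

theorem take_set_succ (l : List Int) (i : Nat) (v : Int) (h : i < l.length) :
    (l.set i v).take (i+1) = l.take i ++ [v] := by
  have := List.set_eq_take_append_cons_drop (l := l) (i := i) (a := v)
  rw [if_pos h] at this
  rw [this, List.take_append]
  simp [List.length_take, Nat.min_eq_left (Nat.le_of_lt h)]

theorem map_range_shift (v : Int) (m : Nat) :
    (List.range (m+1)).map (fun k : Nat => v + (k:Int)) = v :: (List.range m).map (fun k : Nat => v + 1 + (k:Int)) := by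
  rw [List.range_succ_eq_map]
  simp only [List.map_cons, List.map_map, Nat.cast_zero, add_zero, List.cons.injEq, true_and]
  apply List.map_congr_left
  intro k _
  simp [Function.comp]
  ring

theorem cascadeA_spec (l : List Int) (i : Nat) (h1 : 1 ≤ i) :
    cascadeA l i = l.take i ++ (List.range (l.length - i)).map (fun k : Nat => l.getD (i-1) 0 + 1 + (k:Int)) := by
  induction l, i using cascadeA.induct with
  | case1 l i hlt ih =>
    rw [cascadeA, if_pos hlt, ih (by omega)]
    have hv : (l.set i (l.getD (i-1) 0 + 1)).getD (i+1-1) 0 = l.getD (i-1) 0 + 1 := by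
      simp [List.getD, hlt]
    rw [hv, take_set_succ _ _ _ hlt, List.length_set]
    have hm : l.length - i = (l.length - (i+1)) + 1 := by omega
    rw [hm, map_range_shift]
    simp
  | case2 l i hge =>
    rw [cascadeA, if_neg hge]
    simp at hge
    simp [Nat.sub_eq_zero_of_le hge, List.take_of_length_le hge]

theorem cascade_build (e : List Int) (p : Nat) (hp : p < e.length) :
    cascadeA (e.set p (e.getD p 0 + 1)) (p+1) = buildB e p := by
  rw [cascadeA_spec _ _ (by omega)]
  have hv : (e.set p (e.getD p 0 + 1)).getD (p+1-1) 0 = e.getD p 0 + 1 := by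
    simp [List.getD, hp]
  rw [hv, take_set_succ _ _ _ hp, List.length_set, buildB]
  have hm : e.length - p = (e.length - (p+1)) + 1 := by omega
  rw [hm, map_range_shift]
  simp

theorem is_last_iff (e : List Int) (n start : Int) :
    is_last e n start = true ↔ ∀ j : Nat, j < e.length → e.getD j 0 = start + n - e.length + j := by
  have hr : PySem.List.pyRange (start + n - e.length) (start + n) 1
      = (List.range e.length).map (fun k : Nat => start + n - e.length + (k:Int)) := by
    rw [PySem.List.pyRange_one]
    have h1 : start + n - (start + n - (e.length:Int)) = (e.length:Int) := by ring
    rw [h1, Int.toNat_natCast]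
  constructor
  · intro h j hj
    simp only [is_last, decide_eq_true_eq] at h
    rw [h, hr] at hj ⊢
    simp at hj
    rw [List.getD_eq_getElem _ _ (by simpa using hj)]
    simp
  · intro h
    simp only [is_last, decide_eq_true_eq]
    rw [hr]
    apply List.ext_getElem
    · simp
    · intro j hj hj'
      have := h j hj
      rw [List.getD_eq_getElem _ _ hj] at this
      simp [this]

-- bridge: Python's e[-1-i] is the i-th entry of the reversed list
theorem pyGet_rev (e : List Int) (i : Nat) (hi : i < e.length) :
    (PySem.List.pyGet? e (-1 - (i : Int))).getD 0 = e.reverse.getD i 0 := by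
  have h1 : (-1 - (i : Int)) = -(((i+1 : Nat)) : Int) := by push_cast; ring
  rw [h1, PySem.List.pyGet?_neg_natCast e (i+1) (by omega) (by omega)]
  have h2 : e.length - (i+1) = e.length - 1 - i := by omega
  rw [h2, List.getD_eq_getElem?_getD, List.getElem?_reverse hi]

-- characterisation of B's recursion: either every position of rev is maximal
-- (m at the head, decreasing by one), or at the first non-maximal index j it
-- returns the reversed remainder followed by the cascade values
theorem succB_spec (rev : List Int) :
    ∀ m : Int,
    (succB rev m = none ∧ ∀ j : Nat, j < rev.length → rev.getD j 0 = m - j)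
    ∨ (∃ j : Nat, j < rev.length ∧ rev.getD j 0 ≠ m - j ∧
        (∀ q : Nat, q < j → rev.getD q 0 = m - q) ∧
        succB rev m = some ((rev.drop (j+1)).reverse ++
          (List.range (j+1)).map (fun k : Nat => rev.getD j 0 + 1 + (k:Int)))) := by
  induction rev with
  | nil => intro m; left; simp [succB]
  | cons v rest ih =>
    intro m
    by_cases hv : v = m
    · subst hv
      rcases ih (v - 1) with ⟨hn, hall⟩ | ⟨j, hj, hne, hlt, hsome⟩
      · left
        constructor
        · simp [succB, hn]
        · intro j hj
          match j with
          | 0 => simp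
          | j+1 =>
            have := hall j (by simpa using hj)
            simp only [List.getD_cons_succ]
            rw [this]; push_cast; ring
      · right
        refine ⟨j+1, by simpa using hj, ?_, ?_, ?_⟩
        · simp only [List.getD_cons_succ]
          intro h; apply hne; rw [h]; push_cast; ring
        · intro q hq
          match q with
          | 0 => simp
          | q+1 =>
            have := hlt q (by omega)
            simp only [List.getD_cons_succ]
            rw [this]; push_cast; ring
        · have hlast : PySem.List.pyGet? ((rest.drop (j+1)).reverse ++
              (List.range (j+1)).map (fun k : Nat => rest.getD j 0 + 1 + (k:Int))) (-1)
              = some (rest.getD j 0 + 1 + (j:Int)) := by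
            rw [List.range_succ, List.map_append, ← List.append_assoc]
            exact PySem.List.pyGet?_neg_one_append_singleton _ _
          rw [succB.eq_2, if_neg (by simp), hsome]
          simp only [hlast, Option.map_some]
          congr 1
          simp only [List.drop_succ_cons, List.getD_cons_succ]
          conv_rhs => rw [List.range_succ, List.map_append, ← List.append_assoc]
          congr 1
          simp only [List.map_cons, List.map_nil, List.cons.injEq, and_true]
          push_cast; ring
    · right
      refine ⟨0, by simp, by simpa using hv, fun q hq => absurd hq (Nat.not_lt_zero q), ?_⟩
      simp [succB, hv]
  
-- A's generator yields len-1-j for the first non-maximal index j ≥ i of the reversed list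
theorem findA_some (e : List Int) (n start : Int) (i j : Nat)
    (hj : j < e.length) (hij : i ≤ j)
    (hne : e.reverse.getD j 0 ≠ (start + n - 1) - j)
    (hlt : ∀ q : Nat, i ≤ q → q < j → e.reverse.getD q 0 = (start + n - 1) - q) :
    findA e n start i = some (e.length - 1 - j) := by
  revert hij hlt
  refine findA.induct e n start
    (fun i => i ≤ j → (∀ q : Nat, i ≤ q → q < j → e.reverse.getD q 0 = (start + n - 1) - q) →
      findA e n start i = some (e.length - 1 - j)) ?_ ?_ ?_ i
  · intro i hlti hc hij hlt
    have hij' : i = j := by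
      by_contra hne'
      have hiltj : i < j := by omega
      rw [pyGet_rev e i hlti] at hc
      exact hc (by rw [hlt i le_rfl hiltj])
    rw [findA, if_pos hlti, if_pos hc, hij']
  · intro i hlti hc ih hij hlt
    have hine : i ≠ j := by
      intro h
      subst h
      rw [pyGet_rev e i hlti] at hc
      exact hne (not_ne_iff.mp hc)
    rw [findA, if_pos hlti, if_neg hc]
    exact ih (by omega) (fun q hq hq' => hlt q (by omega) hq')
  · intro i hge hij hlt
    omega

theorem rev_getD (e : List Int) (j : Nat) (hj : j < e.length) :
    e.reverse.getD j 0 = e.getD (e.length - 1 - j) 0 := by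
  rw [List.getD_eq_getElem?_getD, List.getD_eq_getElem?_getD, List.getElem?_reverse hj]

-- ===== VERDICT (by name: the statement is the Claim_ definition above) =====
theorem next_element_spec : Claim_equal_next_element := by
  intro e n start _
  unfold Spec_next_element next_element next_element_alt
  rcases succB_spec e.reverse (start + n - 1) with ⟨hn, hall⟩ | ⟨j, hj, hne, hlt, hsome⟩
  · -- every position maximal: both take the last-blade branch
    have hlast : is_last e n start = true := by
      rw [is_last_iff]
      intro i hi
      have hj' : e.length - 1 - i < e.reverse.length := by simp; omega
      have := hall (e.length - 1 - i) (by simpa using hj')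
      rw [rev_getD e _ (by omega)] at this
      have hidx : e.length - 1 - (e.length - 1 - i) = i := by omega
      rw [hidx] at this
      rw [this]
      have : ((e.length - 1 - i : Nat) : Int) = (e.length : Int) - 1 - i := by omega
      rw [this]; ring
    rw [hn, if_pos hlast]
  · -- first non-maximal index j of the reversed list = rightmost position p of e
    have hj' : j < e.length := by simpa using hj
    set p : Nat := e.length - 1 - j with hp
    have hrevj : e.reverse.getD j 0 = e.getD p 0 := rev_getD e j hj'
    have hnl : is_last e n start = false := by
      rw [Bool.eq_false_iff]
      intro h
      apply hne
      rw [hrevj, (is_last_iff e n start).mp h p (by omega)]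
      have : ((p : Nat) : Int) = (e.length : Int) - 1 - j := by omega
      rw [this]; ring
    have hfind : findA e n start 0 = some p :=
      findA_some e n start 0 j hj' (by omega) hne (fun q _ hq => hlt q hq)
    have h1 : (e.reverse.drop (j+1)).reverse = e.take p := by
      rw [List.drop_reverse, List.reverse_reverse]
      congr 1
      omega
    have h2 : (List.range (j+1)).map (fun k : Nat => e.reverse.getD j 0 + 1 + (k:Int))
            = (List.range (e.length - p)).map (fun k : Nat => e.getD p 0 + 1 + (k:Int)) := by
      rw [hrevj]
      congr 2
      omega
    rw [if_neg (by simp [hnl]), hfind, hsome]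
    simp only []
    rw [cascade_build e p (by omega), buildB, h1, h2]
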